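-- pv_equiv track=rewrite | github.com/leixiaohui-1974/CYRP | cyrp/diagnosis/expert_system.py | _minimize_cut_sets
-- ===== SOURCE A (Python) =====
-- from typing import Dict, List, Optional, Any, Tuple, Set, Callable
--
-- def _minimize_cut_sets(cut_sets: List[Set[str]]) -> List[Set[str]]:
--     """最小化割集"""
--     result = []
--     for cs in cut_sets:
--         is_minimal = True
--         for other in cut_sets:
--             if other < cs:  # other是cs的真子集
--                 is_minimal = False
--                 break
--         if is_minimal and cs not in result:
--             result.append(cs)
--     return result
-- ===== SOURCE B (Python) =====
-- from typing import List, Set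
--
-- def _minimize_cut_sets(cut_sets: List[Set[str]]) -> List[Set[str]]:
--     # Phase 1: scan in ascending-size order, keeping a frontier of confirmed-minimal
--     # sets; a set is minimal iff no already-confirmed set is a subset of it.
--     mins = []
--     for cs in sorted(cut_sets, key=len):
--         if not any(m <= cs for m in mins):
--             mins.append(cs)
--     # Phase 2: emit the minimal sets in original first-occurrence order, deduplicated.
--     out = []
--     for cs in cut_sets:
--         if cs in mins and cs not in out:
--             out.append(cs)
--     return out
-- ===== Notes on version B (the rewrite author's own statement) =====
-- stated objective: alternative
-- what changed: Replaces A's all-pairs proper-subset test per element (with interleaved dedup) by a two-phase algorithm: a size-ascending sweep that keeps a frontier of confirmed-minimal sets and tests each set only against that frontier, then a filtering pass over the original list that restores first-occurrence order and dedups.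
import Mathlib
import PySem

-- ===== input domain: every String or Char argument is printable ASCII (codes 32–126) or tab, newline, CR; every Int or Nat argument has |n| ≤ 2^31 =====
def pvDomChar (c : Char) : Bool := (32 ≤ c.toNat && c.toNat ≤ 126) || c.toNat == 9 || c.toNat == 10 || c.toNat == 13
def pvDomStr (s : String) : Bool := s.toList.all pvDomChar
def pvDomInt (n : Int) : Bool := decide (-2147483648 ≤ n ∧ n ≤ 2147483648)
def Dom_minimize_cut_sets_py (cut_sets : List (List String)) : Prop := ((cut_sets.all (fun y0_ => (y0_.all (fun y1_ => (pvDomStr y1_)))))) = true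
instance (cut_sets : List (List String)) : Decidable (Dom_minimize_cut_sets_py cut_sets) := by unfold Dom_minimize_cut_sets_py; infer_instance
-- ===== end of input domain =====

-- B replaces A's all-pairs proper-subset scan by a size-ordered sweep keeping a frontier of
-- confirmed-minimal sets, plus a filtering pass that restores A's first-occurrence output order
-- (objective: alternative algorithm, usually fewer subset tests).

-- ===== PORT A =====
-- Python 'other < cs' on sets: proper subset
def pvProperSub (o cs : List String) : Bool :=
  PySem.Set.issubset o cs && !(PySem.Set.equal o cs)

def minimize_cut_sets_py (cut_sets : List (List String)) : List (List String) :=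
  cut_sets.foldl (fun result cs =>
    if cut_sets.all (fun other => !(pvProperSub other cs))
        && !(result.any (fun r => PySem.Set.equal cs r))
      then result ++ [cs] else result) []

-- ===== PORT B =====
-- len(cs) on a Python set is its cardinality: ported as (Set.ofList cs).length (equal to
-- cs.length on the distinct-element lists that represent sets).
def minimize_cut_sets_py_alt (cut_sets : List (List String)) : List (List String) :=
  let mins := (PySem.List.sorted cut_sets (fun cs => ((PySem.Set.ofList cs).length : Int)) false).foldl
      (fun mins cs => if mins.any (fun m => PySem.Set.issubset m cs) then mins else mins ++ [cs]) []
  cut_sets.foldl (fun out cs =>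
    if mins.any (fun m => PySem.Set.equal cs m) && !(out.any (fun r => PySem.Set.equal cs r))
      then out ++ [cs] else out) []

-- ===== PRECONDITION & SPEC =====
def Spec_minimize_cut_sets_py (cut_sets : List (List String)) (out : List (List String)) : Prop := out = minimize_cut_sets_py_alt cut_sets
instance (cut_sets : List (List String)) (out : List (List String)) : Decidable (Spec_minimize_cut_sets_py cut_sets out) := by unfold Spec_minimize_cut_sets_py; infer_instance

-- ===== CLAIM (what is proved, stated in full; the proofs are below) =====
def Claim_equal_minimize_cut_sets_py : Prop := ∀ (cut_sets : List (List String)), Dom_minimize_cut_sets_py cut_sets → Spec_minimize_cut_sets_py cut_sets (minimize_cut_sets_py cut_sets)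

-- ===== LEMMAS AND PROOFS =====

-- subset of the underlying sets
def pvSb (o c : List String) : Prop := ∀ x ∈ o, x ∈ c

-- "c has no proper subset (as a set) in cut_sets"
def pvMinP (cut_sets : List (List String)) (c : List String) : Prop :=
  ∀ o ∈ cut_sets, ¬ (pvSb o c ∧ ¬ pvSb c o)

def pvCard (c : List String) : Nat := (PySem.Set.ofList c).length

lemma pv_equal_iff (s t : List String) :
    PySem.Set.equal s t = true ↔ (pvSb s t ∧ pvSb t s) := by
  rw [PySem.Set.equal_iff]
  unfold pvSb
  constructor
  · intro h; exact ⟨fun x hx => (h x).mp hx, fun x hx => (h x).mpr hx⟩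
  · intro h x; exact ⟨fun hx => h.1 x hx, fun hx => h.2 x hx⟩

lemma pv_propersub_iff (o cs : List String) :
    pvProperSub o cs = true ↔ (pvSb o cs ∧ ¬ pvSb cs o) := by
  unfold pvProperSub
  rw [Bool.and_eq_true, Bool.not_eq_true', ← Bool.not_eq_true]
  rw [PySem.Set.issubset_iff, pv_equal_iff]
  tauto

lemma pv_condA_iff (cut_sets : List (List String)) (cs : List String) :
    (cut_sets.all (fun other => !(pvProperSub other cs)) = true) ↔ pvMinP cut_sets cs := by
  rw [List.all_eq_true]
  unfold pvMinP
  constructor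
  · intro h o ho
    have := h o ho
    rw [Bool.not_eq_true'] at this
    rw [← pv_propersub_iff o cs, this]; simp
  · intro h o ho
    rw [Bool.not_eq_true', ← Bool.not_eq_true, pv_propersub_iff]
    exact h o ho

lemma pvMinP_congr (cut_sets : List (List String)) (c c' : List String)
    (h1 : pvSb c c') (h2 : pvSb c' c) : pvMinP cut_sets c ↔ pvMinP cut_sets c' := by
  unfold pvMinP pvSb at *
  constructor
  · intro h o ho hx
    exact h o ho ⟨fun x hxo => h2 x (hx.1 x hxo), fun hoc => hx.2 fun x hxc' => hoc x (h2 x hxc')⟩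
  · intro h o ho hx
    exact h o ho ⟨fun x hxo => h1 x (hx.1 x hxo), fun hoc => hx.2 fun x hxc => hoc x (h1 x hxc)⟩

-- a strict set-inclusion strictly decreases cardinality
lemma pv_card_lt (o c : List String) (h1 : pvSb o c) (h2 : ¬ pvSb c o) :
    pvCard o < pvCard c := by
  have hsub : PySem.Set.ofList o ⊆ PySem.Set.ofList c := by
    intro x hx
    exact (PySem.Set.mem_ofList c x).mpr (h1 x ((PySem.Set.mem_ofList o x).mp hx))
  have hsp := (PySem.Set.nodup_ofList o).subperm hsub
  rcases Nat.lt_or_ge (pvCard o) (pvCard c) with hlt | hge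
  · exact hlt
  · exfalso
    have hperm := hsp.perm_of_length_le hge
    apply h2
    intro x hx
    have : x ∈ PySem.Set.ofList o := hperm.mem_iff.mpr ((PySem.Set.mem_ofList c x).mpr hx)
    exact (PySem.Set.mem_ofList o x).mp this

-- every member of cut_sets contains a minimal (w.r.t. cut_sets) member of cut_sets
lemma pv_exists_min_aux (cut_sets : List (List String)) :
    ∀ (k : Nat) (o : List String), o ∈ cut_sets → pvCard o ≤ k →
      ∃ m ∈ cut_sets, pvSb m o ∧ pvMinP cut_sets m := by
  intro k
  induction k with
  | zero =>
    intro o ho hk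
    by_cases hmin : pvMinP cut_sets o
    · exact ⟨o, ho, fun x hx => hx, hmin⟩
    · exfalso
      unfold pvMinP at hmin
      push Not at hmin
      rcases hmin with ⟨o', ho', hs, hns⟩
      have := pv_card_lt o' o hs hns
      omega
  | succ n ih =>
    intro o ho hk
    by_cases hmin : pvMinP cut_sets o
    · exact ⟨o, ho, fun x hx => hx, hmin⟩
    · unfold pvMinP at hmin
      push Not at hmin
      rcases hmin with ⟨o', ho', hs, hns⟩
      have hlt := pv_card_lt o' o hs hns
      rcases ih o' ho' (by omega) with ⟨m, hm, hsb, hminm⟩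
      exact ⟨m, hm, fun x hx => hs x (hsb x hx), hminm⟩

lemma pv_exists_min (cut_sets : List (List String)) (o : List String) (ho : o ∈ cut_sets) :
    ∃ m ∈ cut_sets, pvSb m o ∧ pvMinP cut_sets m :=
  pv_exists_min_aux cut_sets (pvCard o) o ho le_rfl

-- the step of B's first phase
def pvStep (mins : List (List String)) (cs : List String) : List (List String) :=
  if mins.any (fun m => PySem.Set.issubset m cs) then mins else mins ++ [cs]

-- invariant of B's size-ordered sweep
lemma pv_scan_inv (cut_sets : List (List String)) :
    ∀ (suf pre mins : List (List String)),
      PySem.List.sorted cut_sets (fun cs => ((PySem.Set.ofList cs).length : Int)) false = pre ++ suf →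
      (∀ m ∈ mins, m ∈ pre ∧ pvMinP cut_sets m) →
      (∀ c ∈ pre, pvMinP cut_sets c → ∃ m ∈ mins, pvSb m c ∧ pvSb c m) →
      (∀ m ∈ suf.foldl pvStep mins, m ∈ cut_sets ∧ pvMinP cut_sets m) ∧
      (∀ c ∈ cut_sets, pvMinP cut_sets c → ∃ m ∈ suf.foldl pvStep mins, pvSb m c ∧ pvSb c m) := by
  intro suf
  induction suf with
  | nil =>
    intro pre mins hL hi hii
    have hperm := PySem.List.sorted_perm cut_sets (fun cs => ((PySem.Set.ofList cs).length : Int)) false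
    rw [hL] at hperm
    simp only [List.append_nil] at hperm
    constructor
    · intro m hm
      exact ⟨hperm.mem_iff.mp (hi m hm).1, (hi m hm).2⟩
    · intro c hc hmin
      exact hii c (hperm.mem_iff.mpr hc) hmin
  | cons cs suf ih =>
    intro pre mins hL hi hii
    have hperm := PySem.List.sorted_perm cut_sets (fun cs => ((PySem.Set.ofList cs).length : Int)) false
    have hpw := PySem.List.sorted_pairwise cut_sets (fun cs => ((PySem.Set.ofList cs).length : Int))
    rw [hL] at hperm hpw
    have hcs_mem : cs ∈ cut_sets := hperm.mem_iff.mp (by simp)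
    have hpre_mem : ∀ x ∈ pre, x ∈ cut_sets := fun x hx => hperm.mem_iff.mp (by simp [hx])
    simp only [List.foldl_cons]
    by_cases hany : mins.any (fun m => PySem.Set.issubset m cs) = true
    · -- cs is skipped
      have hstep : pvStep mins cs = mins := by unfold pvStep; rw [if_pos hany]
      rw [hstep]
      apply ih (pre ++ [cs]) mins (by rw [hL]; simp)
      · intro m hm
        exact ⟨by simp [(hi m hm).1], (hi m hm).2⟩
      · intro c hc hmin
        rcases List.mem_append.mp hc with hc | hc
        · exact hii c hc hmin
        · -- c = cs, minimal, and some m ∈ mins has m ⊆ cs; then cs ⊆ m too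
          have hc' : c = cs := by simpa using hc
          subst hc'
          rcases List.any_eq_true.mp hany with ⟨m, hm, hsub⟩
          have hsb : pvSb m c := (PySem.Set.issubset_iff m c).mp hsub
          have hmcut : m ∈ cut_sets := hpre_mem m (hi m hm).1
          have := hmin m hmcut
          by_cases hcm : pvSb c m
          · exact ⟨m, hm, hsb, hcm⟩
          · exact absurd ⟨hsb, hcm⟩ this
    · -- cs is kept: cs must be minimal
      have hstep : pvStep mins cs = mins ++ [cs] := by unfold pvStep; rw [if_neg hany]
      rw [hstep]
      have hmincs : pvMinP cut_sets cs := by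
        by_contra hnot
        unfold pvMinP at hnot
        push Not at hnot
        rcases hnot with ⟨o, ho, hs, hns⟩
        rcases pv_exists_min cut_sets o ho with ⟨m0, hm0, hsb0, hmin0⟩
        have hm0cs : pvSb m0 cs := fun x hx => hs x (hsb0 x hx)
        have hncs : ¬ pvSb cs m0 := fun hcs => hns (fun x hx => hsb0 x (hcs x hx))
        have hcard : pvCard m0 < pvCard cs := pv_card_lt m0 cs hm0cs hncs
        -- m0 must lie in pre: everything from cs on has cardinality ≥ pvCard cs
        have hm0L : m0 ∈ pre ++ cs :: suf := hperm.mem_iff.mpr hm0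
        have hm0pre : m0 ∈ pre := by
          rcases List.mem_append.mp hm0L with h | h
          · exact h
          · exfalso
            rcases List.mem_cons.mp h with h | h
            · subst h; omega
            · have hrel := (List.pairwise_append.mp hpw).2.2
              have := List.rel_of_pairwise_cons (List.pairwise_append.mp hpw).2.1 h
              simp only [pvCard] at hcard
              omega
        rcases hii m0 hm0pre hmin0 with ⟨m, hm, hsb, hsb'⟩
        apply hany
        rw [List.any_eq_true]
        exact ⟨m, hm, (PySem.Set.issubset_iff m cs).mpr (fun x hx => hm0cs x (hsb x hx))⟩
      apply ih (pre ++ [cs]) (mins ++ [cs]) (by rw [hL]; simp)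
      · intro m hm
        rcases List.mem_append.mp hm with hm | hm
        · exact ⟨by simp [(hi m hm).1], (hi m hm).2⟩
        · have : m = cs := by simpa using hm
          subst this
          exact ⟨by simp, hmincs⟩
      · intro c hc hmin
        rcases List.mem_append.mp hc with hc | hc
        · rcases hii c hc hmin with ⟨m, hm, h1, h2⟩
          exact ⟨m, by simp [hm], h1, h2⟩
        · have : c = cs := by simpa using hc
          subst this
          exact ⟨c, by simp, fun x hx => hx, fun x hx => hx⟩

-- B's first phase computes, up to set-equality, exactly the minimal members
lemma pv_mins_char (cut_sets : List (List String)) (cs : List String) (hcs : cs ∈ cut_sets) :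
    ((PySem.List.sorted cut_sets (fun cs => ((PySem.Set.ofList cs).length : Int)) false).foldl
        (fun mins cs => if mins.any (fun m => PySem.Set.issubset m cs) then mins else mins ++ [cs]) []).any
      (fun m => PySem.Set.equal cs m) = true ↔ pvMinP cut_sets cs := by
  have hinv := pv_scan_inv cut_sets
      (PySem.List.sorted cut_sets (fun cs => ((PySem.Set.ofList cs).length : Int)) false) [] []
      (by simp) (by simp) (by simp)
  have hfold : (PySem.List.sorted cut_sets (fun cs => ((PySem.Set.ofList cs).length : Int)) false).foldl
      (fun mins cs => if mins.any (fun m => PySem.Set.issubset m cs) then mins else mins ++ [cs]) ([] : List (List String))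
      = (PySem.List.sorted cut_sets (fun cs => ((PySem.Set.ofList cs).length : Int)) false).foldl pvStep [] := by
    unfold pvStep; rfl
  rw [hfold]
  constructor
  · intro h
    rcases List.any_eq_true.mp h with ⟨m, hm, heq⟩
    have heq' := (pv_equal_iff cs m).mp heq
    exact (pvMinP_congr cut_sets m cs heq'.2 heq'.1).mp (hinv.1 m hm).2
  · intro h
    rcases hinv.2 cs hcs h with ⟨m, hm, h1, h2⟩
    exact List.any_eq_true.mpr ⟨m, hm, (pv_equal_iff cs m).mpr ⟨h2, h1⟩⟩

-- ===== VERDICT (by name: the statement is the Claim_ definition above) =====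
theorem minimize_cut_sets_py_spec : Claim_equal_minimize_cut_sets_py := by
  intro cut_sets _
  unfold Spec_minimize_cut_sets_py minimize_cut_sets_py minimize_cut_sets_py_alt
  apply PySem.List.foldl_congr_mem
  intro acc cs hcs
  have hcond : cut_sets.all (fun other => !(pvProperSub other cs))
      = ((PySem.List.sorted cut_sets (fun cs => ((PySem.Set.ofList cs).length : Int)) false).foldl
          (fun mins cs => if mins.any (fun m => PySem.Set.issubset m cs) then mins else mins ++ [cs]) []).any
        (fun m => PySem.Set.equal cs m) := by
    apply Bool.coe_iff_coe.mp
    rw [pv_condA_iff, pv_mins_char cut_sets cs hcs]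
  rw [hcond]
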